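-- pv_equiv track=rewrite | github.com/rodcoelho/python-practice | reverse_except_special_chars.py | reverse_str_leave_special
-- ===== SOURCE A (Python) =====
-- def reverse_str_leave_special(s):
--     s = list(s)
--     temp = []
--     chars = []
--     final = []
--
--     # separate characters
--     for _ in s:
--         if _.isalpha():
--             chars.append(_)
--             temp.append("_")
--         else:
--             temp.append(_)
--
--     # reverse the characters
--     chars = chars[::-1]
--
--     # add back characters
--     for _ in temp:
--         if _ == '_':
--             final.append(chars[0])
--             chars = chars[1:]
--         else:
--             final.append(_)
--
--     return "".join(final)
-- ===== SOURCE B (Python) =====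
-- def reverse_str_leave_special(s):
--     a = list(s)
--     i, j = 0, len(a) - 1
--     while i < j:
--         if not a[i].isalpha():
--             i += 1
--         elif not a[j].isalpha():
--             j -= 1
--         else:
--             a[i], a[j] = a[j], a[i]
--             i += 1
--             j -= 1
--     return "".join(a)
-- ===== Notes on version B (the rewrite author's own statement) =====
-- stated objective: faster
-- what changed: B swaps letters in place with two pointers moving inward from both ends, skipping non-alpha positions, instead of A's three-stage placeholder-mask build, letter reversal and refill with repeated chars = chars[1:] list re-slicing.
-- outside the precondition, e.g. on reverse_str_leave_special('_'): A raises IndexError, B returns '_'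
import Mathlib
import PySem

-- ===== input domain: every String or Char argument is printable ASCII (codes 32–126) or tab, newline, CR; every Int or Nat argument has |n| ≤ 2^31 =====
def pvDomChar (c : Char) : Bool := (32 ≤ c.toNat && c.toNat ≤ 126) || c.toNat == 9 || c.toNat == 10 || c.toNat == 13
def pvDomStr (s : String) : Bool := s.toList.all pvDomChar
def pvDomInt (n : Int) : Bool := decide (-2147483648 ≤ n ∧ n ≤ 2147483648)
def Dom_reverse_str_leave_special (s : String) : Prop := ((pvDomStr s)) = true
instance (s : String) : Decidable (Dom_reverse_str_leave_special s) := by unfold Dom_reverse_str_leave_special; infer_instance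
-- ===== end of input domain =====

-- B reverses the letters in place with two pointers moving inward (O(n)) instead of A's
-- placeholder mask + repeated chars[1:] re-slicing (O(n^2)); return value only.


-- ===== PORT A =====
-- second loop of A: for each temp char, '_' consumes chars[0] then chars = chars[1:].
-- chars[0] on an empty list is IndexError in Python; headD ' ' is unreachable inside Pre_
-- (no literal '_' in s means #placeholders = #letters).
def pvAddBackA : List Char → List Char → List Char
  | [], _ => []
  | c :: rest, chars =>
    if c == '_' then chars.headD ' ' :: pvAddBackA rest (chars.drop 1)
    else c :: pvAddBackA rest chars

def reverse_str_leave_special (s : String) : String :=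
  -- first loop: build (temp, chars) left to right
  let p := s.toList.foldl
    (fun (acc : List Char × List Char) c =>
      if PySem.Chars.isalpha c then (acc.1 ++ ['_'], acc.2 ++ [c])
      else (acc.1 ++ [c], acc.2)) ([], [])
  -- chars = chars[::-1]; then the add-back loop
  String.mk (pvAddBackA p.1 p.2.reverse)

-- ===== PORT B =====
-- B's while loop: two pointers i, j; skip non-alpha from either end, else swap a[i], a[j].
-- In Python j starts at len-1 (= -1 on ""): the loop body never runs then, matching Nat 0 here.
def pvSwapLoop (a : List Char) (i j : Nat) : List Char :=
  if i < j then
    if ¬ (PySem.Chars.isalpha (a.getD i ' ')) then pvSwapLoop a (i + 1) j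
    else if ¬ (PySem.Chars.isalpha (a.getD j ' ')) then pvSwapLoop a i (j - 1)
    else pvSwapLoop ((a.set i (a.getD j ' ')).set j (a.getD i ' ')) (i + 1) (j - 1)
  else a
termination_by j - i

def reverse_str_leave_special_alt (s : String) : String :=
  String.mk (pvSwapLoop s.toList 0 (s.toList.length - 1))

-- ===== PRECONDITION & SPEC =====
-- A raises IndexError on any string containing '_' (the literal underscore is taken for a
-- placeholder and over-consumes the letter list); those inputs are excluded.
def Pre_reverse_str_leave_special (s : String) : Prop := '_' ∉ s.toList
instance (s : String) : Decidable (Pre_reverse_str_leave_special s) := by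
  unfold Pre_reverse_str_leave_special; infer_instance

def pvWitness_reverse_str_leave_special : String := "ab, cd!"

def Spec_reverse_str_leave_special (s : String) (out : String) : Prop :=
  out = reverse_str_leave_special_alt s
instance (s : String) (out : String) : Decidable (Spec_reverse_str_leave_special s out) := by
  unfold Spec_reverse_str_leave_special; infer_instance

-- ===== CLAIM (what is proved, stated in full; the proofs are below) =====
def Claim_equal_reverse_str_leave_special : Prop := ∀ (s : String), Dom_reverse_str_leave_special s → Pre_reverse_str_leave_special s → Spec_reverse_str_leave_special s (reverse_str_leave_special s)

-- ===== LEMMAS AND PROOFS =====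
-- proof-side refill function: fill alpha positions of l from ls, keep non-alpha chars
def pvFillB : List Char → List Char → List Char
  | [], _ => []
  | c :: rest, ls =>
    if PySem.Chars.isalpha c then ls.headD ' ' :: pvFillB rest ls.tail
    else c :: pvFillB rest ls

-- the common target value: refill from the reversed letter list
def pvTarget (l : List Char) : List Char :=
  pvFillB l ((l.filter (fun c => PySem.Chars.isalpha c)).reverse)

-- the first loop of A builds the mask of s and the filtered letters of s
theorem pvSepA_eq (l : List Char) (t c : List Char) :
    l.foldl (fun (acc : List Char × List Char) c =>
      if PySem.Chars.isalpha c then (acc.1 ++ ['_'], acc.2 ++ [c])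
      else (acc.1 ++ [c], acc.2)) (t, c)
    = (t ++ l.map (fun c => if PySem.Chars.isalpha c then '_' else c),
       c ++ l.filter (fun c => PySem.Chars.isalpha c)) := by
  induction l generalizing t c with
  | nil => simp
  | cons x xs ih =>
    by_cases hx : PySem.Chars.isalpha x
    · simp [List.foldl, hx, ih]
    · simp [List.foldl, hx, ih]

-- over an underscore-free list, A's add-back over the mask is the refill over the list
theorem pvAddBack_eq_fill (l : List Char) (h : '_' ∉ l) (ls : List Char) :
    pvAddBackA (l.map (fun c => if PySem.Chars.isalpha c then '_' else c)) ls
    = pvFillB l ls := by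
  induction l generalizing ls with
  | nil => simp [pvAddBackA, pvFillB]
  | cons x xs ih =>
    have hx : x ≠ '_' := fun hh => h (hh ▸ List.mem_cons_self)
    have hxs : '_' ∉ xs := fun hh => h (List.mem_cons_of_mem _ hh)
    by_cases ha : PySem.Chars.isalpha x
    · simp [pvAddBackA, pvFillB, ha, ih hxs, List.drop_one]
    · simp [pvAddBackA, pvFillB, ha, hx, ih hxs]

theorem pvFill_append (xs ys ls : List Char) :
    pvFillB (xs ++ ys) ls
    = pvFillB xs ls ++ pvFillB ys (ls.drop (xs.filter (fun c => PySem.Chars.isalpha c)).length) := by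
  induction xs generalizing ls with
  | nil => simp [pvFillB]
  | cons x xs ih =>
    by_cases hx : PySem.Chars.isalpha x
    · have hdt : ∀ k : Nat, ls.tail.drop k = ls.drop (k + 1) := by
        intro k; rw [← List.drop_one, List.drop_drop]; try rw [Nat.add_comm]
      simp [pvFillB, hx, ih, hdt, Nat.add_comm]
    · simp [pvFillB, hx, ih]

theorem pvFill_extra (xs ls extra : List Char)
    (h : (xs.filter (fun c => PySem.Chars.isalpha c)).length ≤ ls.length) :
    pvFillB xs (ls ++ extra) = pvFillB xs ls := by
  induction xs generalizing ls with
  | nil => simp [pvFillB]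
  | cons x xs ih =>
    by_cases hx : PySem.Chars.isalpha x
    · simp only [List.filter_cons, hx, if_pos, List.length_cons] at h ⊢
      cases ls with
      | nil => simp at h
      | cons y ys => simp [pvFillB, hx, ih _ (by simpa using h)]
    · simp only [List.filter_cons, hx] at h
      simp [pvFillB, hx, ih _ h]

theorem pvTarget_single (c : Char) : pvTarget [c] = [c] := by
  by_cases h : PySem.Chars.isalpha c <;> simp [pvTarget, pvFillB, h]

theorem pvTarget_cons_nonalpha (c : Char) (xs : List Char)
    (h : ¬ PySem.Chars.isalpha c) : pvTarget (c :: xs) = c :: pvTarget xs := by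
  simp [pvTarget, pvFillB, h]

theorem pvTarget_snoc_nonalpha (c : Char) (xs : List Char)
    (h : ¬ PySem.Chars.isalpha c) : pvTarget (xs ++ [c]) = pvTarget xs ++ [c] := by
  unfold pvTarget
  rw [List.filter_append, pvFill_append]
  simp [pvFillB, h]

theorem pvTarget_cons_snoc_alpha (a b : Char) (xs : List Char)
    (ha : PySem.Chars.isalpha a) (hb : PySem.Chars.isalpha b) :
    pvTarget (a :: (xs ++ [b])) = b :: (pvTarget xs ++ [a]) := by
  have hR : (List.filter (fun c => PySem.Chars.isalpha c) (a :: (xs ++ [b]))).reverse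
      = b :: ((List.filter (fun c => PySem.Chars.isalpha c) xs).reverse ++ [a]) := by
    simp [List.filter_cons, List.filter_append, ha, hb]
  unfold pvTarget
  rw [hR]
  have h1 : pvFillB (a :: (xs ++ [b]))
      (b :: ((List.filter (fun c => PySem.Chars.isalpha c) xs).reverse ++ [a]))
      = b :: pvFillB (xs ++ [b])
          ((List.filter (fun c => PySem.Chars.isalpha c) xs).reverse ++ [a]) := by
    simp [pvFillB, ha]
  rw [h1, pvFill_append]
  have hd : ((List.filter (fun c => PySem.Chars.isalpha c) xs).reverse ++ [a]).drop
      (List.filter (fun c => PySem.Chars.isalpha c) xs).length = [a] := by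
    rw [show (List.filter (fun c => PySem.Chars.isalpha c) xs).length
        = (List.filter (fun c => PySem.Chars.isalpha c) xs).reverse.length by simp,
      List.drop_left]
  rw [hd, pvFill_extra _ _ _ (by simp)]
  simp [pvFillB, hb]

-- main invariant: the two-pointer loop computes the target on the segment [i, j]
-- and leaves everything outside untouched
theorem pvSwapLoop_eq (l : List Char) (i j : Nat) :
    i ≤ j + 1 → j + 1 ≤ l.length →
    pvSwapLoop l i j = l.take i ++ pvTarget ((l.drop i).take (j + 1 - i)) ++ l.drop (j + 1) := by
  induction l, i, j using pvSwapLoop.induct with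
  | case1 a i j hlt hna ih =>
    intro hij hj
    have hi : i < a.length := by omega
    have hgd : a.getD i ' ' = a[i] := List.getD_eq_getElem a ' ' hi
    rw [pvSwapLoop, if_pos hlt, if_pos hna, ih (by omega) hj]
    have hseg : (a.drop i).take (j + 1 - i) = a[i] :: (a.drop (i + 1)).take (j - i) := by
      rw [List.drop_eq_getElem_cons hi, show j + 1 - i = (j - i) + 1 by omega,
          List.take_succ_cons]
    have ht : a.take (i + 1) = a.take i ++ [a[i]] := by
      rw [List.take_add_one, List.getElem?_eq_getElem hi]; rfl
    rw [hseg, pvTarget_cons_nonalpha _ _ (by rwa [hgd] at hna),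
        show j + 1 - (i + 1) = j - i by omega, ht]
    simp only [List.append_assoc, List.cons_append, List.nil_append]
  | case2 a i j hlt hpa hnb ih =>
    intro hij hj
    have hjlen : j < a.length := by omega
    have hgd : a.getD j ' ' = a[j] := List.getD_eq_getElem a ' ' hjlen
    rw [pvSwapLoop, if_pos hlt, if_neg hpa, if_pos hnb, ih (by omega) (by omega)]
    have hseg : (a.drop i).take (j + 1 - i)
        = (a.drop i).take (j - i) ++ [a[j]] := by
      rw [show j + 1 - i = (j - i) + 1 by omega, List.take_add_one]
      rw [List.getElem?_drop, show i + (j - i) = j by omega, List.getElem?_eq_getElem hjlen]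
      rfl
    rw [hseg, pvTarget_snoc_nonalpha _ _ (by rwa [hgd] at hnb),
        show j - 1 + 1 = j by omega, List.drop_eq_getElem_cons hjlen]
    simp
  | case3 a i j hlt hpa hpb ih =>
    intro hij hj
    have hi : i < a.length := by omega
    have hjlen : j < a.length := by omega
    have hgdi : a.getD i ' ' = a[i]'hi := List.getD_eq_getElem a ' ' hi
    have hgdj : a.getD j ' ' = a[j]'hjlen := List.getD_eq_getElem a ' ' hjlen
    have hai : PySem.Chars.isalpha (a[i]'hi) := by rw [← hgdi]; by_contra hc; exact hpa hc
    have haj : PySem.Chars.isalpha (a[j]'hjlen) := by rw [← hgdj]; by_contra hc; exact hpb hc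
    rw [pvSwapLoop, if_pos hlt, if_neg hpa, if_neg hpb, hgdi, hgdj]
    rw [hgdi, hgdj] at ih
    set a' := (a.set i (a[j]'hjlen)).set j (a[i]'hi) with ha'
    have hlen' : a'.length = a.length := by simp [ha']
    rw [ih (by omega) (by rw [hlen']; omega)]
    have hget' : ∀ (k : Nat) (hk : k < a.length),
        a'[k]'(by omega) = if k = j then a[i]'hi else if k = i then a[j]'hjlen
          else a[k]'hk := by
      intro k hk
      simp only [ha', List.getElem_set]
      split_ifs <;> first | rfl | omega
    have h1 : a'.take (i + 1) = a.take i ++ [a[j]'hjlen] := by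
      apply List.ext_getElem
      · simp [hlen'] <;> omega
      · intro k hk1 hk2
        have hk : k < i + 1 := by simp [hlen'] at hk1; omega
        rw [List.getElem_take, hget' k (by omega)]
        rcases Nat.lt_or_ge k i with hlt2 | hge
        · rw [if_neg (by omega), if_neg (by omega),
              List.getElem_append_left (by simp; omega), List.getElem_take]
        · have hek : k = i := by omega
          subst hek
          rw [if_neg (by omega), if_pos rfl,
              List.getElem_append_right (by rw [List.length_take]; omega)]
          rw [List.getElem_singleton]
    have h2 : a'.drop j = (a[i]'hi) :: a.drop (j + 1) := by
      apply List.ext_getElem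
      · simp [hlen'] <;> omega
      · intro k hk1 hk2
        have hk : j + k < a.length := by simp [hlen'] at hk1; omega
        rw [List.getElem_drop, hget' (j + k) hk]
        rcases Nat.eq_zero_or_pos k with rfl | hkpos
        · simp
        · rw [if_neg (by omega), if_neg (by omega)]
          rcases k with _ | k'
          · omega
          · rw [List.getElem_cons_succ, List.getElem_drop]
            congr 1
            omega
    have h3 : (a'.drop (i + 1)).take (j - 1 + 1 - (i + 1))
        = (a.drop (i + 1)).take (j - 1 - i) := by
      apply List.ext_getElem
      · simp [hlen'] <;> omega
      · intro k hk1 hk2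
        have hkb : k < j - 1 - i := by simp [hlen'] at hk1; omega
        rw [List.getElem_take, List.getElem_take, List.getElem_drop, List.getElem_drop,
            hget' (i + 1 + k) (by omega), if_neg (by omega), if_neg (by omega)]
    have hseg : (a.drop i).take (j + 1 - i)
        = (a[i]'hi) :: ((a.drop (i + 1)).take (j - 1 - i) ++ [a[j]'hjlen]) := by
      rw [List.drop_eq_getElem_cons hi, show j + 1 - i = (j - i) + 1 by omega,
          List.take_succ_cons]
      congr 1
      rw [show j - i = (j - 1 - i) + 1 by omega, List.take_add_one,
          List.getElem?_drop, show i + 1 + (j - 1 - i) = j by omega,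
          List.getElem?_eq_getElem hjlen]
      rfl
    rw [hseg, pvTarget_cons_snoc_alpha _ _ _ hai haj, h1, h3,
        show j - 1 + 1 = j by omega, h2]
    simp only [List.append_assoc, List.cons_append, List.nil_append]
  | case4 a i j hnlt =>
    intro hij hj
    rw [pvSwapLoop, if_neg hnlt]
    rcases Nat.eq_or_lt_of_le hij with he | hlt
    · rw [← he]
      simp [pvTarget, pvFillB]
    · have he : i = j := by omega
      subst he
      have hjlen : i < a.length := by omega
      rw [List.drop_eq_getElem_cons hjlen, show i + 1 - i = 1 by omega,
          show (1:Nat) = 0 + 1 by omega, List.take_succ_cons, List.take_zero,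
          pvTarget_single]
      have ht : a.take (i + 1) = a.take i ++ [a[i]'hjlen] := by
        rw [List.take_add_one, List.getElem?_eq_getElem hjlen]; rfl
      rw [show a.take i ++ [a[i]'hjlen] ++ a.drop (i + 1)
            = a.take (i + 1) ++ a.drop (i + 1) by rw [ht],
          List.take_append_drop]

theorem pvSwapLoop_eq_target (l : List Char) :
    pvSwapLoop l 0 (l.length - 1) = pvTarget l := by
  cases l with
  | nil => simp [pvSwapLoop, pvTarget, pvFillB]
  | cons x xs =>
    have hlen : (x :: xs).length - 1 + 1 = (x :: xs).length := by simp
    have h := pvSwapLoop_eq (x :: xs) 0 ((x :: xs).length - 1) (by omega)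
      (by simp only [List.length_cons]; omega)
    rw [hlen] at h
    simpa using h

-- ===== VERDICT (by name: the statement is the Claim_ definition above) =====
theorem reverse_str_leave_special_spec : Claim_equal_reverse_str_leave_special := by
  intro s _ hpre
  unfold Spec_reverse_str_leave_special reverse_str_leave_special reverse_str_leave_special_alt
  simp only [pvSepA_eq, List.nil_append]
  rw [pvAddBack_eq_fill _ hpre, pvSwapLoop_eq_target]
  rfl
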